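-- pv_equiv track=rewrite | github.com/Tian-Chris/FPGA_LLM | verify/bram_layout.py | encode_to_banks
-- ===== SOURCE A (Python) =====
-- def encode_to_banks(flat, num_banks):
--     """Interleave flat list across banks: flat[i] -> bank[i % num_banks]."""
--     depth = (len(flat) + num_banks - 1) // num_banks
--     banks = [[] for _ in range(num_banks)]
--     for i, val in enumerate(flat):
--         banks[i % num_banks].append(val)
--
--     # Pad banks to uniform depth
--     for b in range(num_banks):
--         banks[b] += [0] * (depth - len(banks[b]))
--     return banks
-- ===== SOURCE B (Python) =====
-- def _make_bank(flat, b, num_banks, depth):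
--     bank = [flat[i] for i in range(b, len(flat), num_banks)]
--     return bank + [0] * (depth - len(bank))
--
--
-- def encode_to_banks(flat, num_banks):
--     """Gather each bank directly by a strided index range, then pad it to depth."""
--     depth = (len(flat) + num_banks - 1) // num_banks
--     return [_make_bank(flat, b, num_banks, depth) for b in range(num_banks)]
-- ===== Notes on version B (the rewrite author's own statement) =====
-- stated objective: idiomatic
-- what changed: B gathers each bank in one strided pass over indices range(b, len(flat), num_banks) and pads it immediately, instead of A's element-by-element scatter of flat into pre-allocated banks followed by a second padding loop.
import Mathlib
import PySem

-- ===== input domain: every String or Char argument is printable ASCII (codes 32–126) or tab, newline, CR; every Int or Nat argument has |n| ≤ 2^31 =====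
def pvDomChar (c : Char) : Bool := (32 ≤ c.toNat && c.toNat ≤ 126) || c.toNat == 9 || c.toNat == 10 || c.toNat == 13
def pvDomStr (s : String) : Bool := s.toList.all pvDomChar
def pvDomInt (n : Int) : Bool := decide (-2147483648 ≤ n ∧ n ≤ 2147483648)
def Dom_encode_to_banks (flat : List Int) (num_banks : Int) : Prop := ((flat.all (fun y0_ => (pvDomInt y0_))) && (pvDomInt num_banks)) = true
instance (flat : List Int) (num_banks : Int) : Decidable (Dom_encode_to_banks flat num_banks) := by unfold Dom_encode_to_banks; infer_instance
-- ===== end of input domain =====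

-- B gathers each bank by a strided index range and pads it immediately, instead of
-- A's element-by-element scatter into pre-allocated banks plus a second padding loop (objective: idiomatic).

-- ===== PORT A =====
def encode_to_banks (flat : List Int) (num_banks : Int) : List (List Int) :=
  let depth := PySem.Int.floordiv ((flat.length : Int) + num_banks - 1) num_banks
  let banks0 := (PySem.List.pyRange 0 num_banks 1).map (fun _ => ([] : List Int))
  let banks1 := (PySem.List.enumerate flat 0).foldl
    (fun banks iv =>
      match PySem.List.pyGet? banks (PySem.Int.mod iv.1 num_banks) with
      | some bk => PySem.List.pySetD banks (PySem.Int.mod iv.1 num_banks) (bk ++ [iv.2])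
      | none => banks) banks0
  (PySem.List.pyRange 0 num_banks 1).foldl
    (fun banks b =>
      match PySem.List.pyGet? banks b with
      | some bk => PySem.List.pySetD banks b (bk ++ List.replicate (depth - (bk.length : Int)).toNat 0)
      | none => banks) banks1

-- ===== PORT B =====
def make_bank (flat : List Int) (b : Int) (num_banks : Int) (depth : Int) : List Int :=
  let bank := (PySem.List.pyRange b (flat.length : Int) num_banks).map
    (fun i => PySem.List.pyGetD flat i 0)
  bank ++ List.replicate (depth - (bank.length : Int)).toNat 0

def encode_to_banks_alt (flat : List Int) (num_banks : Int) : List (List Int) :=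
  let depth := PySem.Int.floordiv ((flat.length : Int) + num_banks - 1) num_banks
  (PySem.List.pyRange 0 num_banks 1).map (fun b => make_bank flat b num_banks depth)

-- ===== PRECONDITION & SPEC =====
-- A raises ZeroDivisionError when num_banks = 0 and IndexError when num_banks < 0 with non-empty flat;
-- those inputs are excluded.  (num_banks < 0 with empty flat returns [] in both and stays inside Pre_.)
def Pre_encode_to_banks (flat : List Int) (num_banks : Int) : Prop :=
  0 < num_banks ∨ (num_banks < 0 ∧ flat = [])
instance (flat : List Int) (num_banks : Int) : Decidable (Pre_encode_to_banks flat num_banks) := by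
  unfold Pre_encode_to_banks; infer_instance

def pvWitness_encode_to_banks : List Int × Int := ([1, 2, 3, 4, 5], 2)

def Spec_encode_to_banks (flat : List Int) (num_banks : Int) (out : List (List Int)) : Prop := out = encode_to_banks_alt flat num_banks
instance (flat : List Int) (num_banks : Int) (out : List (List Int)) : Decidable (Spec_encode_to_banks flat num_banks out) := by unfold Spec_encode_to_banks; infer_instance

-- ===== CLAIM (what is proved, stated in full; the proofs are below) =====
def Claim_equal_encode_to_banks : Prop := ∀ (flat : List Int) (num_banks : Int), Dom_encode_to_banks flat num_banks → Pre_encode_to_banks flat num_banks → Spec_encode_to_banks flat num_banks (encode_to_banks flat num_banks)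


-- ===== LEMMAS AND PROOFS =====

-- strided gather: elements of flat at indices k, k+(m+1), k+2(m+1), …
def stride (flat : List Int) (m : Nat) (k : Nat) : List Int :=
  if h : k < flat.length then flat[k] :: stride flat m (k + m + 1) else []
termination_by flat.length - k

-- elements of flat (absolute positions starting at s) whose position ≡ b (mod nb)
def gatherMod (nb : Int) (flat : List Int) (s : Int) (b : Int) : List Int :=
  match flat with
  | [] => []
  | x :: xs => (if PySem.Int.mod s nb = b then [x] else []) ++ gatherMod nb xs (s + 1) b

theorem stride_nil (m k : Nat) : stride [] m k = [] := by
  rw [stride]; simp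

theorem stride_cons_succ (x : Int) (xs : List Int) (m k : Nat) :
    stride (x :: xs) m (k + 1) = stride xs m k := by
  conv_lhs => rw [stride]
  conv_rhs => rw [stride]
  by_cases h : k < xs.length
  · rw [dif_pos (show k + 1 < (x :: xs).length by simp; omega), dif_pos h]
    simp only [List.getElem_cons_succ]
    rw [show k + 1 + m + 1 = (k + m + 1) + 1 from by omega,
      stride_cons_succ x xs m (k + m + 1)]
  · rw [dif_neg (by simp; omega), dif_neg h]
termination_by xs.length - k
decreasing_by omega

-- pyRange with positive step: cons/nil unfolding
theorem pyRange_pos_nil (a b s : Int) (hs : 0 < s) (hab : b ≤ a) :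
    PySem.List.pyRange a b s = [] := by
  rw [PySem.List.pyRange_of_pos a b hs]
  simp [show ¬ a < b by omega]

theorem pyRange_pos_cons (a b s : Int) (hs : 0 < s) (hab : a < b) :
    PySem.List.pyRange a b s = a :: PySem.List.pyRange (a + s) b s := by
  rw [PySem.List.pyRange_of_pos a b hs, PySem.List.pyRange_of_pos (a + s) b hs]
  have hcount : (if a < b then ((b - a + s - 1) / s).toNat else 0)
      = (if a + s < b then ((b - (a + s) + s - 1) / s).toNat else 0) + 1 := by
    simp only [if_pos hab]
    by_cases h2 : a + s < b
    · simp only [if_pos h2]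
      have he : b - a + s - 1 = (b - (a + s) + s - 1) + 1 * s := by ring
      rw [he, Int.add_mul_ediv_right _ _ (by omega : s ≠ 0)]
      have hnn : 0 ≤ (b - (a + s) + s - 1) / s := by
        apply Int.ediv_nonneg <;> omega
      omega
    · simp only [if_neg h2]
      have h1 : (b - a + s - 1) / s = 1 := by
        have he : b - a + s - 1 = (b - a - 1) + 1 * s := by ring
        rw [he, Int.add_mul_ediv_right _ _ (by omega : s ≠ 0)]
        have h0 : (b - a - 1) / s = 0 := Int.ediv_eq_zero_of_lt (by omega) (by omega)
        omega
      omega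
  rw [hcount, List.range_succ_eq_map]
  simp only [List.map_cons, List.map_map, Nat.cast_zero, mul_zero, add_zero]
  congr 1
  apply List.map_congr_left
  intro k _
  simp only [Function.comp_apply]
  push_cast
  ring

-- B's bank comprehension is the strided gather
theorem bank_eq_stride (flat : List Int) (nb : Int) (hnb : 0 < nb) (k : Nat) :
    (PySem.List.pyRange (k : Int) (flat.length : Int) nb).map
      (fun i => PySem.List.pyGetD flat i 0) = stride flat (nb.toNat - 1) k := by
  by_cases hk : k < flat.length
  · rw [pyRange_pos_cons _ _ _ hnb (by exact_mod_cast hk), stride, dif_pos hk]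
    simp only [List.map_cons]
    congr 1
    · rw [PySem.List.pyGetD_of_nonneg _ _ (by positivity)]
      simp [List.getD_eq_getElem?_getD, List.getElem?_eq_getElem hk]
    · have hcast : (k : Int) + nb = ((k + (nb.toNat - 1) + 1 : Nat) : Int) := by
        push_cast; omega
      rw [hcast, bank_eq_stride flat nb hnb (k + (nb.toNat - 1) + 1)]
  · rw [pyRange_pos_nil _ _ _ hnb (by exact_mod_cast Nat.le_of_not_lt hk), stride, dif_neg hk]
    simp
termination_by flat.length - k
decreasing_by omega

-- gatherMod in terms of stride
theorem gatherMod_eq_stride (nb : Int) (hnb : 0 < nb) (b : Int) (hb0 : 0 ≤ b) (hb : b < nb)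
    (flat : List Int) (s : Int) :
    gatherMod nb flat s b = stride flat (nb.toNat - 1) (PySem.Int.mod (b - s) nb).toNat := by
  induction flat generalizing s with
  | nil => rw [stride_nil]; rfl
  | cons x xs ih =>
      rw [gatherMod]
      have hme : ∀ a : Int, PySem.Int.mod a nb = a % nb := fun a => PySem.Int.mod_eq_emod_of_pos hnb
      have hbb : b % nb = b := Int.emod_eq_of_lt hb0 hb
      by_cases hc : PySem.Int.mod s nb = b
      · rw [hme] at hc
        have h0' : (b - s) % nb = 0 := by
          rw [Int.sub_emod, hc, hbb]; simp
        have h0 : (PySem.Int.mod (b - s) nb).toNat = 0 := by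
          rw [hme, h0']; rfl
        rw [if_pos (show PySem.Int.mod s nb = b by rw [hme]; exact hc), h0, ih (s + 1)]
        have h1 : (PySem.Int.mod (b - (s + 1)) nb).toNat = (nb.toNat - 1) := by
          rw [hme]
          obtain ⟨c, hcc⟩ := Int.dvd_of_emod_eq_zero h0'
          have he : b - (s + 1) = (nb - 1) + nb * (c - 1) := by
            have : nb * (c - 1) = nb * c - nb := by ring
            omega
          rw [he, Int.add_mul_emod_self_left]
          have : (nb - 1) % nb = nb - 1 := Int.emod_eq_of_lt (by omega) (by omega)
          omega
        rw [h1]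
        conv_rhs => rw [stride]
        rw [dif_pos (show 0 < (x :: xs).length by simp only [List.length_cons]; omega)]
        simp only [List.singleton_append, List.getElem_cons_zero, Nat.zero_add]
        congr 1
        exact (stride_cons_succ x xs (nb.toNat - 1) (nb.toNat - 1)).symm
      · rw [if_neg hc]
        rw [hme] at hc
        have h1 : 0 ≤ (b - s) % nb := Int.emod_nonneg _ (by omega)
        have h2lt : (b - s) % nb < nb := Int.emod_lt_of_pos _ hnb
        have h2 : (b - s) % nb ≠ 0 := by
          intro h0
          apply hc
          obtain ⟨c, hcc⟩ := Int.dvd_of_emod_eq_zero h0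
          have hs' : s = b - nb * c := by omega
          rw [hs', show b - nb * c = b + nb * (-c) from by ring,
            Int.add_mul_emod_self_left, hbb]
        have h5 : (b - (s + 1)) % nb = (b - s) % nb - 1 := by
          conv_lhs => rw [show b - (s + 1) = ((b - s) % nb - 1) + nb * ((b - s) / nb) by
            have := Int.emod_add_ediv (b - s) nb; omega]
          rw [Int.add_mul_emod_self_left]
          exact Int.emod_eq_of_lt (by omega) (by omega)
        obtain ⟨j, hj⟩ : ∃ j, (PySem.Int.mod (b - s) nb).toNat = j + 1 :=
          ⟨(PySem.Int.mod (b - s) nb).toNat - 1, by rw [hme]; omega⟩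
        have hj' := hj
        rw [hme] at hj'
        have h6 : (PySem.Int.mod (b - (s + 1)) nb).toNat = j := by
          rw [hme]
          omega
        rw [ih (s + 1), h6, hj, stride_cons_succ]
        simp

-- the scatter fold, named for the lemmas
def scatterStep (nb : Int) (banks : List (List Int)) (iv : Int × Int) : List (List Int) :=
  match PySem.List.pyGet? banks (PySem.Int.mod iv.1 nb) with
  | some bk => PySem.List.pySetD banks (PySem.Int.mod iv.1 nb) (bk ++ [iv.2])
  | none => banks

theorem scatter_spec (nb : Int) (hnb : 0 < nb) (flat : List Int) :
    ∀ (s : Int) (banks : List (List Int)), 0 ≤ s → banks.length = nb.toNat →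
    (PySem.List.enumerate flat s).foldl (scatterStep nb) banks
      = (List.range banks.length).map (fun b => banks.getD b [] ++ gatherMod nb flat s b) := by
  induction flat with
  | nil =>
      intro s banks _ _
      apply List.ext_getElem
      · simp
      · intro i h1 h2
        simp [gatherMod, List.getD_eq_getElem?_getD, List.getElem?_eq_getElem (by simpa using h2)]
  | cons x xs ih =>
      intro s banks hs hlen
      rw [PySem.List.enumerate_cons, List.foldl_cons]
      have hj0 : 0 ≤ PySem.Int.mod s nb := PySem.Int.mod_nonneg s hnb
      have hjlt : PySem.Int.mod s nb < nb := PySem.Int.mod_lt s hnb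
      set j : Nat := (PySem.Int.mod s nb).toNat with hjdef
      have hjlen : j < banks.length := by rw [hlen]; omega
      have hcast : PySem.Int.mod s nb = (j : Int) := by omega
      have hget : PySem.List.pyGet? banks (PySem.Int.mod s nb) = some banks[j] := by
        rw [hcast, PySem.List.pyGet?_natCast, List.getElem?_eq_getElem hjlen]
      have hstep : scatterStep nb banks (s, x)
          = banks.set j (banks[j] ++ [x]) := by
        unfold scatterStep
        simp only [hget]
        rw [PySem.List.pySetD_of_nonneg _ _ hj0, hcast]
        simp
      rw [hstep, ih (s + 1) _ (by omega) (by simpa using hlen)]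
      apply List.ext_getElem
      · simp
      · intro b h1 h2
        simp only [List.length_set] at *
        have hb : b < banks.length := by simpa using h1
        simp only [List.getElem_map, List.getElem_range]
        have hgb : (banks.set j (banks[j] ++ [x])).getD b []
            = (if b = j then banks[j] ++ [x] else banks.getD b []) := by
          by_cases hbe : b = j
          · subst hbe
            simp [List.getD_eq_getElem?_getD, hb]
          · rw [if_neg hbe]
            have hne : (banks.set j (banks[j] ++ [x]))[b]? = banks[b]? :=
              List.getElem?_set_ne (show j ≠ b by omega)
            simp [List.getD_eq_getElem?_getD, hne]
        rw [hgb, gatherMod]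
        have hcond : (PySem.Int.mod s nb = (b : Int)) ↔ b = j := by
          constructor
          · intro h; omega
          · intro h; subst h; omega
        by_cases hbe : b = j
        · rw [if_pos hbe, if_pos (hcond.mpr hbe), hbe]
          simp [List.getD_eq_getElem?_getD, List.getElem?_eq_getElem hjlen]
        · rw [if_neg hbe, if_neg (fun h => hbe (hcond.mp h))]
          simp

-- the padding fold applies padf at each index in order
theorem pad_fold (padf : List Int → List Int) :
    ∀ (m : Nat) (banks : List (List Int)), m ≤ banks.length →
    (PySem.List.pyRange 0 (m : Int) 1).foldl
      (fun banks b =>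
        match PySem.List.pyGet? banks b with
        | some bk => PySem.List.pySetD banks b (padf bk)
        | none => banks) banks
      = (banks.take m).map padf ++ banks.drop m := by
  intro m
  induction m with
  | zero => intro banks _; simp [PySem.List.pyRange_one_eq_nil]
  | succ m ih =>
      intro banks hm
      rw [show ((m + 1 : Nat) : Int) = (m : Int) + 1 by push_cast; ring,
        PySem.List.pyRange_one_succ_right (by positivity), List.foldl_append, List.foldl_cons,
        List.foldl_nil, ih banks (by omega)]
      have hmin : min m banks.length = m := by omega
      have hmin2 : min (m + 1) banks.length = m + 1 := by omega
      have hq : ((banks.take m).map padf ++ banks.drop m)[m]? = some (banks[m]'(by omega)) := by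
        rw [List.getElem?_append_right (by simp [hmin])]
        simp only [List.length_map, List.length_take, hmin, Nat.sub_self, List.getElem?_drop,
          Nat.add_zero]
        exact List.getElem?_eq_getElem (by omega)
      have hget : PySem.List.pyGet? ((banks.take m).map padf ++ banks.drop m) (m : Int)
          = some (banks[m]'(by omega)) := by
        rw [PySem.List.pyGet?_natCast]; exact hq
      simp only [hget]
      rw [PySem.List.pySetD_of_nonneg _ _ (by positivity)]
      simp only [Int.toNat_natCast]
      apply List.ext_getElem?
      intro i
      rw [List.getElem?_set]
      by_cases him : m = i
      · subst him
        rw [if_pos rfl, if_pos (by simp [hmin]; try omega)]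
        rw [List.getElem?_append_left (by simp [hmin2]; try omega), List.getElem?_map,
          List.getElem?_take, if_pos (Nat.lt_succ_self m),
          List.getElem?_eq_getElem (show m < banks.length by omega)]
        simp
      · rw [if_neg him]
        by_cases hlt : i < m
        · rw [List.getElem?_append_left (by simp [hmin]; try omega),
            List.getElem?_append_left (by simp [hmin2]; try omega)]
          simp only [List.getElem?_map, List.getElem?_take, if_pos hlt,
            if_pos (show i < m + 1 by omega)]
        · rw [List.getElem?_append_right (by simp [hmin]; try omega),
            List.getElem?_append_right (by simp [hmin2]; try omega)]
          simp only [List.getElem?_drop, List.length_map, List.length_take, hmin, hmin2]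
          congr 1
          omega

-- ===== VERDICT (by name: the statement is the Claim_ definition above) =====
theorem encode_to_banks_spec : Claim_equal_encode_to_banks := by
  intro flat num_banks _ hpre
  unfold Spec_encode_to_banks encode_to_banks encode_to_banks_alt
  rcases hpre with hnb | ⟨hnb, hflat⟩
  · -- 0 < num_banks
    show (PySem.List.pyRange 0 num_banks 1).foldl
      (fun banks b =>
        match PySem.List.pyGet? banks b with
        | some bk => PySem.List.pySetD banks b (bk ++ List.replicate
            ((PySem.Int.floordiv ((flat.length : Int) + num_banks - 1) num_banks)
              - (bk.length : Int)).toNat (0 : Int))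
        | none => banks)
      ((PySem.List.enumerate flat 0).foldl
        (fun banks iv =>
          match PySem.List.pyGet? banks (PySem.Int.mod iv.1 num_banks) with
          | some bk => PySem.List.pySetD banks (PySem.Int.mod iv.1 num_banks) (bk ++ [iv.2])
          | none => banks)
        ((PySem.List.pyRange 0 num_banks 1).map (fun _ => ([] : List Int))))
      = (PySem.List.pyRange 0 num_banks 1).map
          (fun b => make_bank flat b num_banks
            (PySem.Int.floordiv ((flat.length : Int) + num_banks - 1) num_banks))
    set depth := PySem.Int.floordiv ((flat.length : Int) + num_banks - 1) num_banks with hdepth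
    set n := num_banks.toNat with hn
    have hnbn : (n : Int) = num_banks := Int.toNat_of_nonneg (by omega)
    have hrange := PySem.List.pyRange_zero_natCast n
    rw [hnbn] at hrange
    have hinit : (PySem.List.pyRange 0 num_banks 1).map (fun _ => ([] : List Int))
        = List.replicate n [] := by
      rw [hrange]
      simp [List.eq_replicate_iff]
    have hscat := scatter_spec num_banks hnb flat 0 (List.replicate n []) le_rfl (by simp [hn])
    have hmid : (List.range ((List.replicate n ([] : List Int)).length)).map
        (fun b => (List.replicate n ([] : List Int)).getD b [] ++ gatherMod num_banks flat 0 (b : Int))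
        = (List.range n).map (fun (b : Nat) => gatherMod num_banks flat 0 (b : Int)) := by
      rw [List.length_replicate]
      apply List.map_congr_left
      intro b hb
      simp [List.getD_eq_getElem?_getD, List.mem_range.mp hb]
    rw [hinit, show (fun (banks : List (List Int)) (iv : Int × Int) =>
        match PySem.List.pyGet? banks (PySem.Int.mod iv.1 num_banks) with
        | some bk => PySem.List.pySetD banks (PySem.Int.mod iv.1 num_banks) (bk ++ [iv.2])
        | none => banks) = scatterStep num_banks from rfl, hscat, hmid]
    have hpad := pad_fold (fun bk => bk ++ List.replicate (depth - (bk.length : Int)).toNat 0)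
      n ((List.range n).map (fun (b : Nat) => gatherMod num_banks flat 0 (b : Int))) (by simp)
    beta_reduce at hpad
    rw [hnbn] at hpad
    rw [hpad, List.take_of_length_le (by simp), List.drop_eq_nil_of_le (by simp),
      List.append_nil, List.map_map]
    conv_rhs => rw [hrange, List.map_map]
    apply List.map_congr_left
    intro b hb
    simp only [Function.comp_apply]
    unfold make_bank
    have hbn : b < n := List.mem_range.mp hb
    have hbank : (PySem.List.pyRange ((b : Int)) (flat.length : Int) num_banks).map
        (fun i => PySem.List.pyGetD flat i 0) = stride flat (num_banks.toNat - 1) b :=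
      bank_eq_stride flat num_banks hnb b
    have hgather : gatherMod num_banks flat 0 (b : Int) = stride flat (num_banks.toNat - 1) b := by
      rw [gatherMod_eq_stride num_banks hnb (b : Int) (by positivity) (by omega) flat 0]
      congr 1
      rw [PySem.Int.mod_eq_emod_of_pos hnb, sub_zero,
        Int.emod_eq_of_lt (by positivity) (by omega)]
      omega
    rw [hbank, hgather]
  · -- num_banks < 0, flat = []
    subst hflat
    rw [PySem.List.pyRange_one_eq_nil (by omega)]
    simp [PySem.List.enumerate]
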